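-- pv_equiv track=rewrite | github.com/articultur/content-extractor | skills/content-extractor/handlers/clipboard.py | _is_markdown
-- ===== SOURCE A (Python) =====
-- def _is_markdown(content: str) -> bool:
--     """Simple markdown detection."""
--     markdown_indicators = [
--         '#',           # Headers
--         '```',         # Code blocks
--         '- ',          # Lists
--         '* ',          # Lists
--         '[ ]',         # Checkboxes
--         '**',          # Bold
--         '__',          # Bold
--         '```'          # Code
--     ]
--     return any(content.startswith(ind) or f'\n{ind}' in content
--                for ind in markdown_indicators)
-- ===== SOURCE B (Python) =====
-- def _is_markdown(content: str) -> bool: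
--     """Simple markdown detection: single pass checking each line start."""
--     markdown_indicators = (
--         '#', '```', '- ', '* ', '[ ]', '**', '__', '```'
--     )
--     at_start = True
--     for i, ch in enumerate(content):
--         if at_start and any(content.startswith(ind, i) for ind in markdown_indicators):
--             return True
--         at_start = ch == '\n'
--     return False
-- ===== Notes on version B (the rewrite author's own statement) =====
-- stated objective: alternative
-- what changed: A runs a separate whole-string substring search ('\n'+ind in content) for each of the 8 indicators; B makes one left-to-right pass over the string, tracking a line-start flag and testing the indicator prefixes only at line starts.
import Mathlib
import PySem

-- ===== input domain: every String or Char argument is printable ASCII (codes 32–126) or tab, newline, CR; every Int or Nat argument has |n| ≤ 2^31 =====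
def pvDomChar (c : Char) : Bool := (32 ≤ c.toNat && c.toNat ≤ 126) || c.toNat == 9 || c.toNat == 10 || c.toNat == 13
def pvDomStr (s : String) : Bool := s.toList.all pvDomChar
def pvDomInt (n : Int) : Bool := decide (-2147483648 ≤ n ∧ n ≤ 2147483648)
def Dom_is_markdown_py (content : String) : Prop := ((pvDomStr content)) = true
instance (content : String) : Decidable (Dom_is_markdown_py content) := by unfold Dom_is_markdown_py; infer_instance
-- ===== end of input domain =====

-- B is an alternative algorithm: one left-to-right pass tracking a line-start flag and
-- checking the indicator prefixes only at line starts, instead of A's eight whole-string substring searches.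

-- ===== PORT A =====
def is_markdown_py (content : String) : Bool :=
  let markdown_indicators : List String :=
    ["#", "```", "- ", "* ", "[ ]", "**", "__", "```"]
  markdown_indicators.any (fun ind =>
    PySem.Str.startswith content ind || PySem.Str.isIn ("\n" ++ ind) content)

-- ===== PORT B =====
def pvIndicators : List String :=
  ["#", "```", "- ", "* ", "[ ]", "**", "__", "```"]

-- any(content.startswith(ind, i) for ind in markdown_indicators), on the current suffix
def pvHit (cs : List Char) : Bool :=
  pvIndicators.any (fun ind => PySem.Chars.startswith cs ind.toList)

-- the for-loop of B: at_start flag, remaining suffix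
def pvAux (b : Bool) : List Char → Bool
  | [] => false
  | c :: t => (b && pvHit (c :: t)) || pvAux (c == '\n') t

def is_markdown_py_alt (content : String) : Bool :=
  pvAux true content.toList

-- ===== PRECONDITION & SPEC =====
def Spec_is_markdown_py (content : String) (out : Bool) : Prop := out = is_markdown_py_alt content
instance (content : String) (out : Bool) : Decidable (Spec_is_markdown_py content out) := by unfold Spec_is_markdown_py; infer_instance

-- ===== CLAIM (what is proved, stated in full; the proofs are below) =====
def Claim_equal_is_markdown_py : Prop := ∀ (content : String), Dom_is_markdown_py content → Spec_is_markdown_py content (is_markdown_py content)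

-- ===== LEMMAS AND PROOFS =====

-- "\n"+ind occurs somewhere in the string, for some indicator
def pvNlHit (cs : List Char) : Bool :=
  pvIndicators.any (fun ind => PySem.Chars.isIn ('\n' :: ind.toList) cs)

theorem pv_any_or {α : Type} (l : List α) (p q : α → Bool) :
    (l.any fun x => p x || q x) = (l.any p || l.any q) := by
  induction l with
  | nil => rfl
  | cons x xs ih =>
    rw [Bool.eq_iff_iff]
    simp only [List.any_cons, Bool.or_eq_true, ih]
    tauto

theorem pv_isIn_cons (ind : List Char) (c : Char) (t : List Char) :
    PySem.Chars.isIn ('\n' :: ind) (c :: t)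
      = (((c == '\n') && PySem.Chars.startswith t ind)
        || PySem.Chars.isIn ('\n' :: ind) t) := by
  rw [Bool.eq_iff_iff]
  simp only [Bool.or_eq_true, Bool.and_eq_true, beq_iff_eq,
    PySem.Chars.isIn_iff_infix, PySem.Chars.startswith_iff,
    List.infix_cons_iff, List.cons_prefix_cons]
  tauto

theorem pv_nlHit_cons (c : Char) (t : List Char) :
    pvNlHit (c :: t) = (((c == '\n') && pvHit t) || pvNlHit t) := by
  unfold pvNlHit pvHit
  rw [Bool.eq_iff_iff]
  simp only [List.any_eq_true, pv_isIn_cons, Bool.or_eq_true, Bool.and_eq_true]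
  constructor
  · rintro ⟨x, hx, ⟨hc, hs⟩ | hi⟩
    · exact Or.inl ⟨hc, x, hx, hs⟩
    · exact Or.inr ⟨x, hx, hi⟩
  · rintro (⟨hc, x, hx, hs⟩ | ⟨x, hx, hi⟩)
    · exact ⟨x, hx, Or.inl ⟨hc, hs⟩⟩
    · exact ⟨x, hx, Or.inr hi⟩

theorem pv_aux_eq (s : List Char) : ∀ b, pvAux b s = ((b && pvHit s) || pvNlHit s) := by
  induction s with
  | nil => intro b; cases b <;> decide
  | cons c t ih =>
    intro b
    rw [pvAux, ih (c == '\n'), pv_nlHit_cons]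

-- ===== VERDICT (by name: the statement is the Claim_ definition above) =====
theorem is_markdown_py_spec : Claim_equal_is_markdown_py := by
  intro content _
  unfold Spec_is_markdown_py is_markdown_py is_markdown_py_alt
  rw [pv_aux_eq content.toList true, Bool.true_and]
  show pvIndicators.any _ = _
  rw [pv_any_or]
  unfold pvHit pvNlHit
  congr 1
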